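-- pv_equiv track=rewrite | github.com/Yi-YongMin/algorithm | kit/sq_6.py | solution
-- ===== SOURCE A (Python) =====
-- def solution(prices):
--     n = len(prices)
--     answer = [0] * n
--     stack = []
--
--     for i in range(n):
--         # 스택의 최상단 원소보다 현재 가격이 떨어지면 스택에서 pop
--         while stack and prices[stack[-1]] > prices[i]:
--             j = stack.pop()
--             answer[j] = i - j
--         stack.append(i)
--
--     # 스택에 남아있는 원소들의 처리
--     while stack:
--         j = stack.pop()
--         answer[j] = n - j - 1
--
--     return answer
-- ===== SOURCE B (Python) =====
-- def solution(prices):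
--     n = len(prices)
--     answer = []
--     for i in range(n):
--         d = n - 1 - i
--         for j in range(i + 1, n):
--             if prices[j] < prices[i]:
--                 d = j - i
--                 break
--         answer.append(d)
--     return answer
-- ===== Notes on version B (the rewrite author's own statement) =====
-- stated objective: simpler
-- what changed: Replaced the monotonic index stack with a direct nested forward scan: for each i find the first later index whose price is strictly lower, defaulting to n-1-i.
import Mathlib
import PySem

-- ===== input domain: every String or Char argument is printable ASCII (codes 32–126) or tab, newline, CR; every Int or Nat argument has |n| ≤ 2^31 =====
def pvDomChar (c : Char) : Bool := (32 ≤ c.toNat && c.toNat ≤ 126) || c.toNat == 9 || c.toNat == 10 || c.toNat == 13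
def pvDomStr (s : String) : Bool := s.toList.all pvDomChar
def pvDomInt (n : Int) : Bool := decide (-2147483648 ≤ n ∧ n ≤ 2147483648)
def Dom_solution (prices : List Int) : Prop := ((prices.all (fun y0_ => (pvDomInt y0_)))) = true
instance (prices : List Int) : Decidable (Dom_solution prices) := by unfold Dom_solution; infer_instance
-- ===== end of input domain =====

-- B replaces A's monotonic index stack by a plain nested forward scan (first strictly lower
-- later price, default n-1-i); simpler to read, not faster (O(n^2) vs A's O(n)).

-- ===== PORT A =====
-- A's inner while-loop; the stack is kept head-as-top (Python's list end).
-- All indexing is provably in range, so prices[j] is ported as prices.getD j 0 (exact there).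
def popLoop (prices : List Int) (i : Nat) (st : List Nat) (answer : List Int) :
    List Nat × List Int :=
  match st with
  | [] => ([], answer)
  | j :: rest =>
    if prices.getD j 0 > prices.getD i 0 then
      popLoop prices i rest (answer.set j ((i : Int) - (j : Int)))
    else (j :: rest, answer)

-- A's final while-loop: answer[j] = n - j - 1 for each index left on the stack.
def drainLoop (n : Nat) (st : List Nat) (answer : List Int) : List Int :=
  match st with
  | [] => answer
  | j :: rest => drainLoop n rest (answer.set j ((n : Int) - (j : Int) - 1))

def solution (prices : List Int) : List Int :=
  let n := prices.length
  let s := (List.range n).foldl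
    (fun (sa : List Nat × List Int) i =>
      let t := popLoop prices i sa.1 sa.2
      (i :: t.1, t.2))
    ([], List.replicate n 0)
  drainLoop n s.1 s.2

-- ===== PORT B =====
-- for each i: first j in range(i+1, n) with prices[j] < prices[i] gives j - i, else n - 1 - i
def solution_alt (prices : List Int) : List Int :=
  let n := prices.length
  (List.range n).map (fun i =>
    match (List.range' (i+1) (n - (i+1))).find?
        (fun j => prices.getD j 0 < prices.getD i 0) with
    | some j => (j : Int) - (i : Int)
    | none => (n : Int) - 1 - (i : Int))

-- ===== PRECONDITION & SPEC =====
def Spec_solution (prices : List Int) (out : List Int) : Prop := out = solution_alt prices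
instance (prices : List Int) (out : List Int) : Decidable (Spec_solution prices out) := by unfold Spec_solution; infer_instance

-- ===== CLAIM (what is proved, stated in full; the proofs are below) =====
def Claim_equal_solution : Prop := ∀ (prices : List Int), Dom_solution prices → Spec_solution prices (solution prices)

-- ===== LEMMAS AND PROOFS =====

-- keepB prices i j: no price strictly below prices[j] occurs at an index in (j, i)
def keepB (prices : List Int) (i j : Nat) : Bool :=
  (List.range' (j+1) (i - (j+1))).all (fun k => decide (prices.getD j 0 ≤ prices.getD k 0))

-- the stack (head = top) after the main loop has processed indices 0..i-1
def stackSpec (prices : List Int) (i : Nat) : List Nat :=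
  ((List.range i).filter (fun j => keepB prices i j)).reverse

-- B's per-index value
def fval (prices : List Int) (i : Nat) : Int :=
  match (List.range' (i+1) (prices.length - (i+1))).find?
      (fun j => prices.getD j 0 < prices.getD i 0) with
  | some j => (j : Int) - (i : Int)
  | none => (prices.length : Int) - 1 - (i : Int)

-- the answer list after the main loop has processed indices 0..i-1
def ansSpec (prices : List Int) (i : Nat) : List Int :=
  (List.range prices.length).map
    (fun j => if j < i ∧ keepB prices i j = false then fval prices j else 0)

lemma alt_eq (prices : List Int) :
    solution_alt prices = (List.range prices.length).map (fval prices) := rfl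

lemma keepB_le {prices : List Int} {i b k : Nat} (hb : keepB prices i b = true)
    (h1 : b < k) (h2 : k < i) : prices.getD b 0 ≤ prices.getD k 0 := by
  have hmem : k ∈ List.range' (b+1) (i - (b+1)) := by
    rw [List.mem_range'_1]; omega
  have := List.all_eq_true.1 hb k hmem
  simpa using this

lemma keepB_succ {prices : List Int} {i j : Nat} (h : j < i) :
    keepB prices (i+1) j
      = (keepB prices i j && decide (prices.getD j 0 ≤ prices.getD i 0)) := by
  unfold keepB
  have h1 : i + 1 - (j+1) = (i - (j+1)) + 1 := by omega
  have h2 : (j+1) + 1 * (i - (j+1)) = i := by omega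
  rw [h1, List.range'_concat, h2, List.all_append]
  simp

lemma keepB_top (prices : List Int) (i : Nat) : keepB prices (i+1) i = true := by
  unfold keepB
  simp

lemma mem_stackSpec {prices : List Int} {i a : Nat} :
    a ∈ stackSpec prices i ↔ a < i ∧ keepB prices i a = true := by
  simp [stackSpec, List.mem_filter, List.mem_range]

lemma stackSpec_sorted (prices : List Int) (i : Nat) :
    (stackSpec prices i).Pairwise (· > ·) := by
  have h : ((List.range i).filter (fun j => keepB prices i j)).Pairwise (· < ·) :=
    List.Pairwise.filter _ List.pairwise_lt_range
  rw [stackSpec, List.pairwise_reverse]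
  exact h.imp (fun hab => hab)

lemma stackSpec_nodup (prices : List Int) (i : Nat) : (stackSpec prices i).Nodup :=
  (stackSpec_sorted prices i).imp (fun h => Nat.ne_of_gt h)

lemma popLoop_eq (prices : List Int) (i : Nat) :
    ∀ (st : List Nat) (ans : List Int),
      st.Pairwise (· > ·) →
      (∀ a ∈ st, a < i ∧ keepB prices i a = true) →
      popLoop prices i st ans =
        (st.filter (fun j => !(decide (prices.getD i 0 < prices.getD j 0))),
         (st.filter (fun j => decide (prices.getD i 0 < prices.getD j 0))).foldl
           (fun a j => a.set j ((i : Int) - (j : Int))) ans) := by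
  intro st
  induction st with
  | nil => intro ans _ _; simp [popLoop]
  | cons j rest ih =>
    intro ans hpw hmem
    rw [List.pairwise_cons] at hpw
    by_cases h : prices.getD i 0 < prices.getD j 0
    · rw [popLoop, if_pos h]
      rw [ih _ hpw.2 (fun a ha => hmem a (List.mem_cons_of_mem _ ha))]
      have hd : decide (prices.getD i 0 < prices.getD j 0) = true := decide_eq_true h
      rw [List.filter_cons, List.filter_cons, hd]
      simp
    · rw [popLoop, if_neg h]
      have hall : ∀ b ∈ j :: rest, ¬ (prices.getD i 0 < prices.getD b 0) := by
        intro b hb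
        rcases List.mem_cons.1 hb with hbj | hbr
        · subst hbj; exact h
        · have hbj : b < j := hpw.1 b hbr
          have hji : j < i := (hmem j (List.mem_cons_self)).1
          have hkb : keepB prices i b = true := (hmem b hb).2
          have h1 : prices.getD b 0 ≤ prices.getD j 0 := keepB_le hkb hbj hji
          have h2 : prices.getD j 0 ≤ prices.getD i 0 := not_lt.1 h
          exact not_lt.2 (le_trans h1 h2)
      have e1 : (j :: rest).filter (fun b => !(decide (prices.getD i 0 < prices.getD b 0)))
          = j :: rest := by
        apply List.filter_eq_self.2
        intro b hb; simpa using hall b hb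
      have e2 : (j :: rest).filter (fun b => decide (prices.getD i 0 < prices.getD b 0))
          = [] := by
        apply List.filter_eq_nil_iff.2
        intro b hb; simpa using hall b hb
      rw [e1, e2]
      rfl

lemma foldl_set_getElem? (v : Nat → Int) :
    ∀ (l : List Nat) (ans : List Int) (m : Nat), l.Nodup → (∀ j ∈ l, j < ans.length) →
      (l.foldl (fun a j => a.set j (v j)) ans)[m]? =
        if m ∈ l then some (v m) else ans[m]? := by
  intro l
  induction l with
  | nil => intro ans m _ _; simp
  | cons j rest ih =>
    intro ans m hnd hlen
    rw [List.nodup_cons] at hnd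
    rw [List.foldl_cons,
      ih (ans.set j (v j)) m hnd.2
        (fun a ha => by rw [List.length_set]; exact hlen a (List.mem_cons_of_mem _ ha))]
    by_cases hm : m ∈ rest
    · simp [hm, List.mem_cons]
    · by_cases hmj : m = j
      · subst hmj
        have : m < ans.length := hlen m List.mem_cons_self
        simp [hm, List.getElem?_set_self this]
      · have := List.getElem?_set_ne (l := ans) (a := v j) (fun h => hmj (Eq.symm h))
        simp [hm, hmj, this]

lemma find?_range'_eq_some {p : Nat → Bool} :
    ∀ (len s i : Nat), s ≤ i → i < s + len → p i = true →
      (∀ k, s ≤ k → k < i → p k = false) →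
      (List.range' s len).find? p = some i := by
  intro len
  induction len with
  | zero => intro s i h1 h2 _ _; omega
  | succ m ih =>
    intro s i h1 h2 hp hmin
    rw [List.range'_succ, List.find?_cons]
    by_cases hsi : s = i
    · subst hsi; simp [hp]
    · have hps : p s = false := hmin s le_rfl (by omega)
      rw [hps]
      exact ih (s+1) i (by omega) (by omega) hp (fun k hk1 hk2 => hmin k (by omega) hk2)

lemma fval_drop {prices : List Int} {i m : Nat} (hmi : m < i) (hin : i < prices.length)
    (hk : keepB prices i m = true) (hd : prices.getD i 0 < prices.getD m 0) :
    fval prices m = (i : Int) - (m : Int) := by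
  unfold fval
  rw [find?_range'_eq_some (prices.length - (m+1)) (m+1) i (by omega) (by omega)
    (by simpa using hd)
    (fun k hk1 hk2 => by
      simp only [decide_eq_false_iff_not, not_lt]
      exact keepB_le hk (by omega) hk2)]

lemma fval_none {prices : List Int} {m : Nat} (hm : m < prices.length)
    (hk : keepB prices prices.length m = true) :
    fval prices m = (prices.length : Int) - 1 - (m : Int) := by
  unfold fval
  rw [List.find?_eq_none.2 (fun k hkmem => by
    rw [List.mem_range'_1] at hkmem
    simp only [decide_eq_true_eq, not_lt]
    exact keepB_le hk (by omega) (by omega))]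

lemma ansSpec_getElem? (prices : List Int) (i m : Nat) :
    (ansSpec prices i)[m]? =
      if m < prices.length then
        some (if m < i ∧ keepB prices i m = false then fval prices m else 0)
      else none := by
  unfold ansSpec
  by_cases h : m < prices.length
  · rw [List.getElem?_map, List.getElem?_range h, if_pos h]
    rfl
  · rw [List.getElem?_map, if_neg h, List.getElem?_eq_none (by simpa using Nat.le_of_not_lt h)]
    rfl

lemma ansSpec_length (prices : List Int) (i : Nat) :
    (ansSpec prices i).length = prices.length := by
  simp [ansSpec]

lemma stackSpec_succ (prices : List Int) (i : Nat) :
    stackSpec prices (i+1)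
      = i :: (stackSpec prices i).filter
          (fun j => !(decide (prices.getD i 0 < prices.getD j 0))) := by
  have hq : (List.range i).filter (fun j => keepB prices (i+1) j)
      = (List.range i).filter
          (fun j => (!(decide (prices.getD i 0 < prices.getD j 0))) && keepB prices i j) := by
    apply List.filter_congr
    intro j hj
    rw [List.mem_range] at hj
    rw [keepB_succ hj, Bool.and_comm]
    congr 1
    by_cases hle : prices.getD j 0 ≤ prices.getD i 0
    · rw [decide_eq_true hle, decide_eq_false (not_lt.2 hle)]
      rfl
    · rw [decide_eq_false hle, decide_eq_true (not_le.1 hle)]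
      rfl
  have h1 : [i].filter (fun j => keepB prices (i+1) j) = [i] := by
    simp [keepB_top]
  rw [stackSpec, stackSpec, List.range_succ, List.filter_append, h1, List.reverse_append, hq]
  simp [List.filter_reverse, List.filter_filter]

lemma ansSpec_succ (prices : List Int) (i : Nat) (h : i < prices.length) :
    ((stackSpec prices i).filter (fun j => decide (prices.getD i 0 < prices.getD j 0))).foldl
        (fun a j => a.set j ((i : Int) - (j : Int))) (ansSpec prices i)
      = ansSpec prices (i+1) := by
  apply List.ext_getElem?
  intro m
  rw [foldl_set_getElem? _ _ _ _ ((stackSpec_nodup prices i).filter _)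
    (fun a ha => by
      rw [ansSpec_length]
      have := (mem_stackSpec.1 (List.mem_of_mem_filter ha)).1
      omega)]
  have hmemf : m ∈ (stackSpec prices i).filter
      (fun j => decide (prices.getD i 0 < prices.getD j 0)) ↔
      (m < i ∧ keepB prices i m = true ∧ prices.getD i 0 < prices.getD m 0) := by
    rw [List.mem_filter, mem_stackSpec]
    simp [and_assoc]
  rw [ansSpec_getElem?, ansSpec_getElem?]
  by_cases hmn : m < prices.length
  · rw [if_pos hmn, if_pos hmn]
    by_cases hm : m ∈ (stackSpec prices i).filter
        (fun j => decide (prices.getD i 0 < prices.getD j 0))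
    · rw [if_pos hm]
      obtain ⟨h1, h2, h3⟩ := hmemf.1 hm
      have hk1 : keepB prices (i+1) m = false := by
        rw [keepB_succ h1, h2]
        simp only [Bool.true_and, decide_eq_false_iff_not, not_le]
        exact h3
      rw [if_pos ⟨by omega, hk1⟩, fval_drop h1 h h2 h3]
    · rw [if_neg hm]
      congr 1
      rcases Nat.lt_trichotomy m i with hlt | heq | hgt
      · rcases Bool.eq_false_or_eq_true (keepB prices i m) with hb | hb
        · have h3 : ¬ prices.getD i 0 < prices.getD m 0 := fun hc =>
            hm (hmemf.2 ⟨hlt, hb, hc⟩)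
          have hk1 : keepB prices (i+1) m = true := by
            rw [keepB_succ hlt, hb]
            simp only [Bool.true_and, decide_eq_true_eq]
            exact not_lt.1 h3
          rw [if_neg (by rintro ⟨_, hc⟩; rw [hb] at hc; cases hc),
            if_neg (by rintro ⟨_, hc⟩; rw [hk1] at hc; cases hc)]
        · have hk1 : keepB prices (i+1) m = false := by
            rw [keepB_succ hlt, hb]
            rfl
          rw [if_pos ⟨hlt, hb⟩, if_pos ⟨by omega, hk1⟩]
      · subst heq
        rw [if_neg (by rintro ⟨hc, _⟩; omega),
          if_neg (by rintro ⟨_, hc⟩; rw [keepB_top] at hc; cases hc)]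
      · rw [if_neg (by rintro ⟨hc, _⟩; omega), if_neg (by rintro ⟨hc, _⟩; omega)]
  · rw [if_neg hmn, if_neg hmn,
      if_neg (fun hc => by have := (hmemf.1 hc).1; omega)]

lemma fold_spec (prices : List Int) :
    ∀ i, i ≤ prices.length →
      (List.range i).foldl
        (fun (sa : List Nat × List Int) k =>
          let t := popLoop prices k sa.1 sa.2
          (k :: t.1, t.2))
        ([], List.replicate prices.length 0)
      = (stackSpec prices i, ansSpec prices i) := by
  intro i
  induction i with
  | zero =>
    intro _
    simp [stackSpec, ansSpec, List.map_const']
  | succ i ih =>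
    intro h
    rw [List.range_succ, List.foldl_append, ih (by omega)]
    simp only [List.foldl_cons, List.foldl_nil]
    rw [popLoop_eq prices i (stackSpec prices i) (ansSpec prices i)
      (stackSpec_sorted prices i) (fun a ha => mem_stackSpec.1 ha)]
    refine Prod.ext ?_ ?_
    · exact (stackSpec_succ prices i).symm
    · exact ansSpec_succ prices i (by omega)

lemma drain_eq_foldl (n : Nat) :
    ∀ (st : List Nat) (ans : List Int),
      drainLoop n st ans = st.foldl (fun a j => a.set j ((n : Int) - (j : Int) - 1)) ans := by
  intro st
  induction st with
  | nil => intro ans; rfl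
  | cons j rest ih => intro ans; rw [drainLoop, List.foldl_cons, ih]

-- ===== VERDICT (by name: the statement is the Claim_ definition above) =====
theorem solution_spec : Claim_equal_solution := by
  intro prices _
  unfold Spec_solution
  show drainLoop prices.length
      ((List.range prices.length).foldl
        (fun (sa : List Nat × List Int) i =>
          let t := popLoop prices i sa.1 sa.2
          (i :: t.1, t.2))
        ([], List.replicate prices.length 0)).1
      ((List.range prices.length).foldl
        (fun (sa : List Nat × List Int) i =>
          let t := popLoop prices i sa.1 sa.2
          (i :: t.1, t.2))
        ([], List.replicate prices.length 0)).2
    = solution_alt prices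
  rw [fold_spec prices prices.length le_rfl, drain_eq_foldl, alt_eq]
  apply List.ext_getElem?
  intro m
  rw [foldl_set_getElem? _ _ _ _ (stackSpec_nodup prices prices.length)
    (fun a ha => by
      rw [ansSpec_length]
      exact (mem_stackSpec.1 ha).1)]
  rw [ansSpec_getElem?, List.getElem?_map]
  by_cases hmn : m < prices.length
  · rw [List.getElem?_range hmn, Option.map_some, if_pos hmn]
    by_cases hm : m ∈ stackSpec prices prices.length
    · obtain ⟨h1, h2⟩ := mem_stackSpec.1 hm
      rw [if_pos hm, fval_none h1 h2]
      congr 1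
      ring
    · rw [if_neg hm]
      have hk : keepB prices prices.length m = false := by
        rcases Bool.eq_false_or_eq_true (keepB prices prices.length m) with hb | hb
        · exact absurd (mem_stackSpec.2 ⟨hmn, hb⟩) hm
        · exact hb
      rw [if_pos ⟨hmn, hk⟩]
  · have hm : ¬ m ∈ stackSpec prices prices.length := fun hc =>
      hmn (mem_stackSpec.1 hc).1
    rw [if_neg hm, if_neg hmn,
      List.getElem?_eq_none (by simpa using Nat.le_of_not_lt hmn)]
    rfl
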